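-- pv_equiv track=rewrite | github.com/Porruzz/Proyecto-Corte2-Lenguajes | src/lexer/rules.py | match_integer
-- ===== SOURCE A (Python) =====
-- import string
--
-- DIGITOS = string.digits
--
-- def match_integer(src: str, i: int) -> int:
--     """Enteros con signo opcional: [+-]?[0-9]+
--        Nota: el signo se reconoce como parte del número solo si hay dígitos después."""
--     if i >= len(src):
--         return i
--     j = i
--     # signo opcional
--     if src[j] in "+-":
--         if j + 1 < len(src) and src[j+1] in DIGITOS:
--             j += 1
--         else:
--             return i  # '+' o '-' solo no es número
--     # dígitos obligatorios
--     if j < len(src) and src[j] in DIGITOS: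
--         j += 1
--         while j < len(src) and src[j] in DIGITOS:
--             j += 1
--         return j
--     return i
-- ===== SOURCE B (Python) =====
-- import re
--
-- PATRON = re.compile(r'[+-]?[0-9]+')
--
-- def match_integer(src: str, i: int) -> int:
--     # Positions outside the string never start a token.
--     if i < 0 or i >= len(src):
--         return i
--     m = PATRON.match(src, i)
--     return m.end() if m else i
-- ===== Notes on version B (the rewrite author's own statement) =====
-- stated objective: idiomatic
-- what changed: The hand-written sign/digit scan with manual index bookkeeping is replaced by one anchored precompiled regular expression [+-]?[0-9]+ matched at position i, plus a guard that positions outside the string never match.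
-- intended difference: For -len(src) <= i < 0 where a number actually starts at the wrapped position (a digit there, or a sign followed by a digit), A's negative-index wraparound scans src[len+i:] (even running past index 0 back to the string start) and returns a non-negative end position, while B returns i unchanged: a lexer position is an absolute index, so a negative position should never match a token. — e.g. on match_integer("5", -1): A returns 1, B returns -1
import Mathlib
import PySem

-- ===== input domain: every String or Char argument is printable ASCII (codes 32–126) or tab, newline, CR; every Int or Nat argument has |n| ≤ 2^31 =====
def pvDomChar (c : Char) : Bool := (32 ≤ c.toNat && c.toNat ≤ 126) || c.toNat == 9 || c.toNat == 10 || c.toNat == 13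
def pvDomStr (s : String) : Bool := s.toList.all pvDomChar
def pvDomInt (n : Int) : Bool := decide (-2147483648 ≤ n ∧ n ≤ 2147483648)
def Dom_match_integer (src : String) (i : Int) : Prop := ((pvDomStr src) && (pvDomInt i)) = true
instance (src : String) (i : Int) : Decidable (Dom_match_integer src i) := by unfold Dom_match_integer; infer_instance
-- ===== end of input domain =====

-- B replaces A's hand-written sign/digit scan by a single anchored regex [+-]?[0-9]+
-- matched at position i (idiomatic); return-value equivalence only, outside D_ below.

-- ===== PORT A =====
-- src[j] in "+-"  (Python membership; index may be negative — pyGet? wraps like Python;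
-- none = IndexError, which Pre_ excludes)
def pvIsSign (o : Option Char) : Bool :=
  match o with
  | some c => c = '+' ∨ c = '-'
  | none => false

-- src[j] in DIGITOS  (DIGITOS = string.digits)
def pvIsDig (o : Option Char) : Bool :=
  match o with
  | some c => "0123456789".toList.contains c
  | none => false

-- the 'while j < len(src) and src[j] in DIGITOS: j += 1' loop of A
-- (fuel = remaining distance to the end; one fuel per iteration, exactly the while loop)
def pvALoopF : Nat → List Char → Int → Int
  | 0, _, j => j
  | f + 1, cs, j =>
    if j < (cs.length : Int) ∧ pvIsDig (PySem.List.pyGet? cs j) then pvALoopF f cs (j + 1)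
    else j

def pvALoop (cs : List Char) (j : Int) : Int :=
  pvALoopF ((cs.length : Int) - j).toNat cs j

def match_integer (src : String) (i : Int) : Int :=
  let cs := src.toList
  if (cs.length : Int) ≤ i then i                           -- if i >= len(src): return i
  else
    -- signo opcional
    let jr : Option Int :=
      if pvIsSign (PySem.List.pyGet? cs i) then
        if i + 1 < (cs.length : Int) ∧ pvIsDig (PySem.List.pyGet? cs (i + 1)) then some (i + 1)
        else none                                           -- return i ('+'/'-' solo)
      else some i
    match jr with
    | none => i
    | some j =>
      -- dígitos obligatorios
      if j < (cs.length : Int) ∧ pvIsDig (PySem.List.pyGet? cs j) then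
        pvALoop cs (j + 1)
      else i

-- ===== PORT B =====
-- Source B uses re; no regex engine in Lean, so the anchored match of [+-]?[0-9]+ is ported
-- by hand, exactly: optional sign, then a maximal nonempty digit run; returns the match
-- LENGTH (m.end() = i + length), none where the regex does not match.
def pvDigitsRun : List Char → Nat
  | [] => 0
  | c :: cs => if '0' ≤ c ∧ c ≤ '9' then pvDigitsRun cs + 1 else 0

def pvReMatchLen (cs : List Char) : Option Nat :=
  match cs with
  | [] => none
  | c :: rest =>
    if c = '+' ∨ c = '-' then
      let n := pvDigitsRun rest
      if n = 0 then none else some (n + 1)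
    else
      let n := pvDigitsRun cs
      if n = 0 then none else some n

def match_integer_alt (src : String) (i : Int) : Int :=
  if i < 0 ∨ (src.toList.length : Int) ≤ i then i
  else
    match pvReMatchLen (src.toList.drop i.toNat) with
    | some n => i + n
    | none => i

-- ===== PRECONDITION & SPEC =====
-- A raises IndexError (src[j] with j < -len(src)) exactly when i < -len(src).
def Pre_match_integer (src : String) (i : Int) : Prop :=
  -(src.toList.length : Int) ≤ i
instance (src : String) (i : Int) : Decidable (Pre_match_integer src i) := by
  unfold Pre_match_integer; infer_instance

def pvWitness_match_integer : String × Int := ("+5", 0)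

-- For -len(src) <= i < 0 where a number starts at the wrapped position (digit there, or a
-- sign followed by a digit), A's negative-index wraparound scans from src[len+i] (running
-- past index 0 back to the string start) and returns a non-negative end position, while B
-- returns i: a lexer position is an absolute index, so a negative position should not match.
def D_match_integer (src : String) (i : Int) : Prop :=
  let cs := src.toList
  i < 0 ∧ -(cs.length : Int) ≤ i ∧
    ((pvIsDig (PySem.List.pyGet? cs i)) = true ∨
     ((pvIsSign (PySem.List.pyGet? cs i)) = true ∧ (pvIsDig (PySem.List.pyGet? cs (i + 1))) = true))
instance (src : String) (i : Int) : Decidable (D_match_integer src i) := by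
  unfold D_match_integer; infer_instance

def Spec_match_integer (src : String) (i : Int) (out : Int) : Prop :=
  ¬ D_match_integer src i → out = match_integer_alt src i
instance (src : String) (i : Int) (out : Int) : Decidable (Spec_match_integer src i out) := by
  unfold Spec_match_integer; infer_instance

def pvDiffWitness_match_integer : String × Int := ("5", -1)
def pvDiffWitnessOut_match_integer : Int × Int := (1, -1)

-- ===== CLAIM (what is proved, stated in full; the proofs are below) =====
def Claim_unchanged_match_integer : Prop := ∀ (src : String) (i : Int), Dom_match_integer src i → Pre_match_integer src i → Spec_match_integer src i (match_integer src i)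
def Claim_changed_match_integer : Prop := Dom_match_integer (pvDiffWitness_match_integer.1) (pvDiffWitness_match_integer.2) ∧ Pre_match_integer (pvDiffWitness_match_integer.1) (pvDiffWitness_match_integer.2) ∧ D_match_integer (pvDiffWitness_match_integer.1) (pvDiffWitness_match_integer.2) ∧ match_integer (pvDiffWitness_match_integer.1) (pvDiffWitness_match_integer.2) = pvDiffWitnessOut_match_integer.1 ∧ match_integer_alt (pvDiffWitness_match_integer.1) (pvDiffWitness_match_integer.2) = pvDiffWitnessOut_match_integer.2 ∧ pvDiffWitnessOut_match_integer.1 ≠ pvDiffWitnessOut_match_integer.2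
def Claim_exact_match_integer : Prop := ∀ (src : String) (i : Int), Dom_match_integer src i → Pre_match_integer src i → D_match_integer src i → match_integer src i ≠ match_integer_alt src i

-- ===== LEMMAS AND PROOFS =====

-- one-step unfolding of A's while loop
lemma pvALoop_unfold (cs : List Char) (j : Int) :
    pvALoop cs j =
      if j < (cs.length : Int) ∧ pvIsDig (PySem.List.pyGet? cs j) then pvALoop cs (j + 1)
      else j := by
  unfold pvALoop
  by_cases h : j < (cs.length : Int) ∧ pvIsDig (PySem.List.pyGet? cs j) = true
  · have hf : ((cs.length : Int) - j).toNat = ((cs.length : Int) - (j + 1)).toNat + 1 := by omega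
    rw [hf, pvALoopF, if_pos h]
  · rcases hf : ((cs.length : Int) - j).toNat with _ | f
    · rw [pvALoopF, if_neg h]
    · rw [pvALoopF, if_neg h, if_neg h]

-- the two digit tests agree
lemma pvIsDig_iff (c : Char) : pvIsDig (some c) = true ↔ ('0' ≤ c ∧ c ≤ '9') := by
  simp [pvIsDig, Char.le_def]
  constructor
  · intro h; rcases h with h|h|h|h|h|h|h|h|h|h <;> subst h <;> decide
  · rintro ⟨h1, h2⟩
    have hv : c.val.toNat = 48 ∨ c.val.toNat = 49 ∨ c.val.toNat = 50 ∨ c.val.toNat = 51 ∨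
        c.val.toNat = 52 ∨ c.val.toNat = 53 ∨ c.val.toNat = 54 ∨ c.val.toNat = 55 ∨
        c.val.toNat = 56 ∨ c.val.toNat = 57 := by
      have b1 := UInt32.le_iff_toNat_le.mp h1
      have b2 := UInt32.le_iff_toNat_le.mp h2
      have a1 : (48 : UInt32).toNat = 48 := by decide
      have a2 : (57 : UInt32).toNat = 57 := by decide
      omega
    have hinj : ∀ d : Char, c.val.toNat = d.val.toNat → c = d := by
      intro d hd
      exact Char.ext (UInt32.toNat_inj.mp hd)
    rcases hv with h|h|h|h|h|h|h|h|h|h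
    · exact Or.inl (hinj '0' (by rw [h]; decide))
    · exact Or.inr (Or.inl (hinj '1' (by rw [h]; decide)))
    · exact Or.inr (Or.inr (Or.inl (hinj '2' (by rw [h]; decide))))
    · exact Or.inr (Or.inr (Or.inr (Or.inl (hinj '3' (by rw [h]; decide)))))
    · exact Or.inr (Or.inr (Or.inr (Or.inr (Or.inl (hinj '4' (by rw [h]; decide))))))
    · exact Or.inr (Or.inr (Or.inr (Or.inr (Or.inr (Or.inl (hinj '5' (by rw [h]; decide)))))))
    · exact Or.inr (Or.inr (Or.inr (Or.inr (Or.inr (Or.inr (Or.inl (hinj '6' (by rw [h]; decide))))))))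
    · exact Or.inr (Or.inr (Or.inr (Or.inr (Or.inr (Or.inr (Or.inr (Or.inl (hinj '7' (by rw [h]; decide)))))))))
    · exact Or.inr (Or.inr (Or.inr (Or.inr (Or.inr (Or.inr (Or.inr (Or.inr (Or.inl (hinj '8' (by rw [h]; decide))))))))))
    · exact Or.inr (Or.inr (Or.inr (Or.inr (Or.inr (Or.inr (Or.inr (Or.inr (Or.inr (hinj '9' (by rw [h]; decide))))))))))

lemma pvDigitsRun_cons_true (c : Char) (cs : List Char) (h : pvIsDig (some c) = true) :
    pvDigitsRun (c :: cs) = pvDigitsRun cs + 1 := by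
  simp [pvDigitsRun, if_pos ((pvIsDig_iff c).mp h)]

lemma pvDigitsRun_cons_false (c : Char) (cs : List Char) (h : pvIsDig (some c) = false) :
    pvDigitsRun (c :: cs) = 0 := by
  simp only [pvDigitsRun]
  rw [if_neg]
  intro hc
  exact absurd ((pvIsDig_iff c).mpr hc) (by simp [h])

-- A's while-loop equals j + length of the digit run starting at j (0 ≤ j)
lemma pvALoop_eq (cs : List Char) (j : Int) (h0 : 0 ≤ j) :
    pvALoop cs j = j + (pvDigitsRun (cs.drop j.toNat) : Int) := by
  by_cases hlt : j < (cs.length : Int)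
  · have hjn : j.toNat < cs.length := by omega
    have hget : PySem.List.pyGet? cs j = some cs[j.toNat] := by
      rw [PySem.List.pyGet?_of_nonneg cs h0]
      simp [List.getElem?_eq_getElem hjn]
    have hdrop : cs.drop j.toNat = cs[j.toNat] :: cs.drop (j.toNat + 1) :=
      List.drop_eq_getElem_cons hjn
    have h1toNat : (j + 1).toNat = j.toNat + 1 := by omega
    by_cases hd : pvIsDig (PySem.List.pyGet? cs j) = true
    · have ih := pvALoop_eq cs (j + 1) (by omega)
      rw [pvALoop_unfold]
      rw [if_pos ⟨hlt, hd⟩, ih, h1toNat, hdrop,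
        pvDigitsRun_cons_true _ _ (by rw [← hget]; exact hd)]
      push_cast; ring
    · rw [pvALoop_unfold]
      rw [if_neg (by tauto), hdrop,
        pvDigitsRun_cons_false _ _ (by rw [← hget]; simpa using hd)]
      simp
  · rw [pvALoop_unfold]
    rw [if_neg (by tauto)]
    have : cs.length ≤ j.toNat := by omega
    simp [List.drop_eq_nil_of_le this, pvDigitsRun]
termination_by ((cs.length : Int) - j).toNat
decreasing_by omega

-- A's loop only moves forward
lemma pvALoop_ge (cs : List Char) (j : Int) : j ≤ pvALoop cs j := by
  rw [pvALoop_unfold]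
  split
  · have := pvALoop_ge cs (j + 1); omega
  · omega
termination_by ((cs.length : Int) - j).toNat
decreasing_by rename_i h _; omega

-- the main agreement, for 0 ≤ i < len
lemma pv_main (src : String) (i : Int) (h0 : 0 ≤ i) (hl : i < (src.toList.length : Int)) :
    match_integer src i = match_integer_alt src i := by
  set cs := src.toList with hcs
  have hin : i.toNat < cs.length := by omega
  have hget : PySem.List.pyGet? cs i = some cs[i.toNat] := by
    rw [PySem.List.pyGet?_of_nonneg cs h0]
    simp [List.getElem?_eq_getElem hin]
  have hdrop : cs.drop i.toNat = cs[i.toNat] :: cs.drop (i.toNat + 1) :=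
    List.drop_eq_getElem_cons hin
  have h1toNat : (i + 1).toNat = i.toNat + 1 := by omega
  unfold match_integer match_integer_alt
  simp only [← hcs]
  rw [if_neg (by omega), if_neg (by omega : ¬ (i < 0 ∨ (cs.length : Int) ≤ i))]
  by_cases hs : pvIsSign (PySem.List.pyGet? cs i) = true
  · rw [if_pos hs]
    have hsc : cs[i.toNat] = '+' ∨ cs[i.toNat] = '-' := by
      rw [hget] at hs; simpa [pvIsSign, decide_eq_true_eq] using hs
    by_cases hnext : i + 1 < (cs.length : Int) ∧ pvIsDig (PySem.List.pyGet? cs (i + 1)) = true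
    · -- sign then digit
      obtain ⟨hn1, hn2⟩ := hnext
      rw [if_pos ⟨hn1, hn2⟩]
      have hin1 : i.toNat + 1 < cs.length := by omega
      have hget1 : PySem.List.pyGet? cs (i + 1) = some cs[i.toNat + 1] := by
        rw [PySem.List.pyGet?_of_nonneg cs (by omega : (0:Int) ≤ i + 1), h1toNat]
        simp [List.getElem?_eq_getElem hin1]
      have hd1 : pvIsDig (some cs[i.toNat + 1]) = true := by rw [← hget1]; exact hn2
      simp only []
      rw [if_pos ⟨hn1, hn2⟩]
      rw [pvALoop_eq cs (i + 1 + 1) (by omega)]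
      have hdrop1 : cs.drop (i.toNat + 1) = cs[i.toNat + 1] :: cs.drop (i.toNat + 2) :=
        List.drop_eq_getElem_cons hin1
      rw [hdrop]
      simp only [pvReMatchLen]
      rw [if_pos hsc, hdrop1, pvDigitsRun_cons_true _ _ hd1]
      rw [if_neg (by omega : ¬ (pvDigitsRun (cs.drop (i.toNat + 2)) + 1 = 0))]
      have h2toNat : (i + 1 + 1).toNat = i.toNat + 2 := by omega
      rw [h2toNat]; push_cast; ring
    · -- lone sign: both return i
      rw [if_neg hnext]
      rw [hdrop]
      simp only [pvReMatchLen]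
      rw [if_pos hsc]
      have hz : pvDigitsRun (cs.drop (i.toNat + 1)) = 0 := by
        by_cases hn1 : i + 1 < (cs.length : Int)
        · have hn2 : pvIsDig (PySem.List.pyGet? cs (i + 1)) = false := by
            rcases Bool.eq_false_or_eq_true (pvIsDig (PySem.List.pyGet? cs (i + 1))) with h|h
            · exact absurd ⟨hn1, h⟩ hnext
            · exact h
          have hin1 : i.toNat + 1 < cs.length := by omega
          have hget1 : PySem.List.pyGet? cs (i + 1) = some cs[i.toNat + 1] := by
            rw [PySem.List.pyGet?_of_nonneg cs (by omega : (0:Int) ≤ i + 1), h1toNat]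
            simp [List.getElem?_eq_getElem hin1]
          rw [List.drop_eq_getElem_cons hin1]
          exact pvDigitsRun_cons_false _ _ (by rw [← hget1]; exact hn2)
        · have : cs.length ≤ i.toNat + 1 := by omega
          simp [List.drop_eq_nil_of_le this, pvDigitsRun]
      rw [hz]
      simp
  · rw [if_neg hs]
    have hns : ¬ (cs[i.toNat] = '+' ∨ cs[i.toNat] = '-') := by
      intro hc; apply hs; rw [hget]; simpa [pvIsSign, decide_eq_true_eq] using hc
    simp only []
    by_cases hd : pvIsDig (PySem.List.pyGet? cs i) = true
    · rw [if_pos ⟨hl, hd⟩]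
      rw [pvALoop_eq cs (i + 1) (by omega)]
      rw [hdrop]
      simp only [pvReMatchLen]
      rw [if_neg hns, pvDigitsRun_cons_true _ _ (by rw [← hget]; exact hd)]
      rw [if_neg (by omega : ¬ (pvDigitsRun (cs.drop (i.toNat + 1)) + 1 = 0))]
      rw [h1toNat]; push_cast; ring
    · rw [if_neg (by tauto)]
      rw [hdrop]
      simp only [pvReMatchLen]
      rw [if_neg hns,
        pvDigitsRun_cons_false _ _ (by rw [← hget]; simpa using hd)]
      simp

-- ===== VERDICT (by name: the statement is the Claim_ definition above) =====
theorem match_integer_spec : Claim_unchanged_match_integer := by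
  intro src i _ hpre hnd
  by_cases h0 : 0 ≤ i
  · by_cases hl : i < (src.toList.length : Int)
    · exact pv_main src i h0 hl
    · -- i ≥ len : both return i
      unfold match_integer match_integer_alt
      rw [if_pos (by omega), if_pos (by omega : i < 0 ∨ (src.toList.length : Int) ≤ i)]
  · -- i < 0, inside Pre_, outside D_: both return i
    set cs := src.toList with hcs
    have hlen : -(cs.length : Int) ≤ i := hpre
    have hneg : i < 0 := by omega
    have hBi : match_integer_alt src i = i := by
      unfold match_integer_alt
      rw [if_pos (Or.inl hneg)]
    rw [hBi]
    unfold D_match_integer at hnd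
    simp only [← hcs] at hnd
    push_neg at hnd
    have hnd' := hnd hneg hlen
    unfold match_integer
    simp only [← hcs]
    rw [if_neg (by omega)]
    by_cases hs : pvIsSign (PySem.List.pyGet? cs i) = true
    · rw [if_pos hs]
      rw [if_neg (by
        intro hc
        exact absurd hc.2 (by simpa using hnd'.2 hs))]
    · rw [if_neg hs]
      simp only []
      rw [if_neg (by
        intro hc
        exact absurd hc.2 (by simpa using hnd'.1))]

theorem match_integer_changed : Claim_changed_match_integer := by
  unfold Claim_changed_match_integer; decide

theorem match_integer_tight : Claim_exact_match_integer := by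
  intro src i _ hpre hD
  set cs := src.toList with hcs
  obtain ⟨hneg, hlen, hcase⟩ := hD
  simp only [← hcs] at hlen hcase
  have hBi : match_integer_alt src i = i := by
    unfold match_integer_alt
    rw [if_pos (Or.inl hneg)]
  rw [hBi]
  have hlenpos : 1 ≤ (cs.length : Int) := by omega
  unfold match_integer
  simp only [← hcs]
  rw [if_neg (by omega)]
  have hn1 : i + 1 < (cs.length : Int) := by omega
  rcases hcase with hd | ⟨hs, hd1⟩
  · -- digit at i: no sign (digits are not signs), loop runs at least once
    have hns : pvIsSign (PySem.List.pyGet? cs i) = false := by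
      cases hg : PySem.List.pyGet? cs i with
      | none => simp [pvIsSign]
      | some c =>
        rw [hg] at hd
        have hc := (pvIsDig_iff c).mp hd
        simp only [pvIsSign, decide_eq_true_eq]
        simp only [Bool.decide_or, Bool.or_eq_false_iff, decide_eq_false_iff_not]
        constructor <;> rintro rfl <;> revert hc <;> decide
    rw [if_neg (by simp [hns])]
    show (if i < (cs.length : Int) ∧ pvIsDig (PySem.List.pyGet? cs i) = true then
        pvALoop cs (i + 1) else i) ≠ i
    rw [if_pos ⟨by omega, hd⟩]
    have := pvALoop_ge cs (i + 1)
    omega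
  · -- sign at i, digit at i+1
    rw [if_pos hs]
    rw [if_pos ⟨hn1, hd1⟩]
    show (if i + 1 < (cs.length : Int) ∧ pvIsDig (PySem.List.pyGet? cs (i + 1)) = true then
        pvALoop cs (i + 1 + 1) else i) ≠ i
    rw [if_pos ⟨hn1, hd1⟩]
    have := pvALoop_ge cs (i + 1 + 1)
    omega
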